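-- pv_equiv track=rewrite | github.com/byerlikaya/Septum | packages/core/septum_core/detector.py | _snap_to_word_boundaries
-- ===== SOURCE A (Python) =====
-- def _snap_to_word_boundaries(text: str, start: int, end: int) -> tuple[int, int]:
--     """Expand a span to cover the full word(s) it touches.
--
--     Subword-tokenisation models can produce spans that begin or end
--     mid-word (e.g. "kara" inside "Ankara"). This helper expands the
--     boundaries outward to the nearest whitespace / punctuation so the
--     replacement never breaks a word.
--     """
--     _BOUNDARY_CHARS = frozenset(" \t\n\r.,;:!?()[]{}\"'/-")
--     while start > 0 and text[start - 1] not in _BOUNDARY_CHARS: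
--         start -= 1
--     n = len(text)
--     while end < n and text[end] not in _BOUNDARY_CHARS:
--         end += 1
--     return start, end
-- ===== SOURCE B (Python) =====
-- def _snap_to_word_boundaries(text: str, start: int, end: int) -> tuple[int, int]:
--     """Expand a span to the nearest word boundaries using per-character
--     string searches (str.rfind/str.find) instead of char-by-char loops."""
--     _BOUNDARY_CHARS = " \t\n\r.,;:!?()[]{}\"'/-"
--     if start > 0:
--         start = max(text.rfind(c, 0, start) for c in _BOUNDARY_CHARS) + 1
--     n = len(text)
--     if end < n:
--         finds = [p for p in (text.find(c, end) for c in _BOUNDARY_CHARS) if p != -1]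
--         end = min(finds) if finds else n
--     return start, end
-- ===== Notes on version B (the rewrite author's own statement) =====
-- stated objective: faster
-- what changed: Replaces the two char-by-char Python-level while loops with per-boundary-character C-level string searches: the left edge becomes max of str.rfind(c,0,start) over the 18 boundary chars plus one, the right edge the min of the non-negative str.find(c,end) results, defaulting to len(text).
-- outside the precondition, e.g. on _snap_to_word_boundaries('a b', 0, -1): A returns (0, 1), B returns (0, 3)
-- crash fix: A raises IndexError when start > len(text) or end < -len(text) (out-of-range subscript); B returns the normally snapped span there, e.g. (0, 2) on ('ab', 3, 0). — e.g. on _snap_to_word_boundaries("ab", 3, 0): A raises IndexError, B returns (0, 2)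
import Mathlib
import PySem

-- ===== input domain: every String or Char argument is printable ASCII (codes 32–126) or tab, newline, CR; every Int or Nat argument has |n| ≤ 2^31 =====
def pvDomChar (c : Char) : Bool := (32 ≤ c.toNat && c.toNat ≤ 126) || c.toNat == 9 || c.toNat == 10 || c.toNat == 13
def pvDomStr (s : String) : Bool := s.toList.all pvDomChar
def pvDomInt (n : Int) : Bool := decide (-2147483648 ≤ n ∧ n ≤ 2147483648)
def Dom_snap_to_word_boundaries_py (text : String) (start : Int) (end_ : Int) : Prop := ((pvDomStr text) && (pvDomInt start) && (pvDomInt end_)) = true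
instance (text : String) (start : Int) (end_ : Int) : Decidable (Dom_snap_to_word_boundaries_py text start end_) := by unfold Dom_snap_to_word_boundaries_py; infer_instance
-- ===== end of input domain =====

-- B replaces A's two char-by-char while loops by per-boundary-character rfind/find searches
-- combined with max/min (objective: faster in a timing run). Pre_ excludes negative end
-- indices: invalid spans on which A's negative-index wraparound value is accidental.


-- ===== PORT A =====
-- the boundary characters; A keeps them as a frozenset
def pvBStr : String := " \t\n\r.,;:!?()[]{}\"'/-"
def pvBSet : PySem.Set Char := PySem.Set.ofList pvBStr.toList

-- 'while start > 0 and text[start - 1] not in _BOUNDARY_CHARS: start -= 1'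
-- (pyGet? = none means Python raises IndexError there; the loop is left, outside Pre_)
def pvLoopL (text : String) (start : Int) : Int :=
  if _h : 0 < start then
    match PySem.Str.pyGet? text (start - 1) with
    | some ch => if pvBSet.contains ch then start else pvLoopL text (start - 1)
    | none => start
  else start
termination_by start.toNat
decreasing_by omega

-- 'while end < n and text[end] not in _BOUNDARY_CHARS: end += 1'
def pvLoopR (text : String) (end_ : Int) : Int :=
  if _h : end_ < PySem.Str.len text then
    match PySem.Str.pyGet? text end_ with
    | some ch => if pvBSet.contains ch then end_ else pvLoopR text (end_ + 1)
    | none => end_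
  else end_
termination_by (PySem.Str.len text - end_).toNat
decreasing_by simp [PySem.Str.len] at *; omega

def snap_to_word_boundaries_py (text : String) (start : Int) (end_ : Int) : Int × Int :=
  (pvLoopL text start, pvLoopR text end_)

-- ===== PORT B =====
-- if start > 0: start = max(text.rfind(c, 0, start) for c in _BOUNDARY_CHARS) + 1
-- if end < n:
--   finds = [p for p in (text.find(c, end) for c in _BOUNDARY_CHARS) if p != -1]
--   end = min(finds) if finds else n
-- (the generators are 18 elements long, so Python's max/min see a nonempty list; every
--  rfind result is ≥ -1 and every kept find result is ≥ 0, so the .getD defaults are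
--  never the result: .getD only discharges the Option)
def snap_to_word_boundaries_py_alt (text : String) (start : Int) (end_ : Int) : Int × Int :=
  let new_start :=
    if 0 < start then
      (PySem.List.max? (pvBStr.toList.map
          (fun c => PySem.Str.rfindFrom text (String.mk [c]) 0 (some start))) (fun x => x)).getD (-1) + 1
    else start
  let n := PySem.Str.len text
  let new_end :=
    if end_ < n then
      let finds :=
        (pvBStr.toList.map (fun c => PySem.Str.findFrom text (String.mk [c]) end_)).filter
          (fun p => p ≠ -1)
      if finds.isEmpty then n else (PySem.List.min? finds (fun x => x)).getD 0
    else end_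
  (new_start, new_end)

-- ===== PRECONDITION & SPEC =====
-- A raises IndexError iff start > len(text) or end < -len(text); Pre_ additionally excludes
-- negative end indices (-len ≤ end < 0): these are invalid spans no caller passes, on which
-- A's value arises from Python's accidental negative-index wraparound (A scans from position
-- len+end and may even return a negative end) while B searches from a clamped position —
-- neither value is a specified answer for this corner (cite in claim.json).
def Pre_snap_to_word_boundaries_py (text : String) (start : Int) (end_ : Int) : Prop :=
  start ≤ (text.toList.length : Int) ∧ 0 ≤ end_
instance (text : String) (start : Int) (end_ : Int) : Decidable (Pre_snap_to_word_boundaries_py text start end_) := by unfold Pre_snap_to_word_boundaries_py; infer_instance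

def pvWitness_snap_to_word_boundaries_py : String × Int × Int := ("Ankara is big", 3, 5)

-- A raises IndexError when start > len(text) or end < -len(text); B returns the snapped span.
def Raises_snap_to_word_boundaries_py (text : String) (start : Int) (end_ : Int) : Prop :=
  (text.toList.length : Int) < start ∨ end_ < -(text.toList.length : Int)
instance (text : String) (start : Int) (end_ : Int) : Decidable (Raises_snap_to_word_boundaries_py text start end_) := by unfold Raises_snap_to_word_boundaries_py; infer_instance
def pvRaiseWitness_snap_to_word_boundaries_py : String × Int × Int := ("ab", 3, 0)
def pvRaiseWitnessOut_snap_to_word_boundaries_py : Int × Int := (0, 2)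

def Spec_snap_to_word_boundaries_py (text : String) (start : Int) (end_ : Int) (out : Int × Int) : Prop := out = snap_to_word_boundaries_py_alt text start end_
instance (text : String) (start : Int) (end_ : Int) (out : Int × Int) : Decidable (Spec_snap_to_word_boundaries_py text start end_ out) := by unfold Spec_snap_to_word_boundaries_py; infer_instance

-- ===== CLAIM (what is proved, stated in full; the proofs are below) =====
def Claim_equal_snap_to_word_boundaries_py : Prop := ∀ (text : String) (start : Int) (end_ : Int), Dom_snap_to_word_boundaries_py text start end_ → Pre_snap_to_word_boundaries_py text start end_ → Spec_snap_to_word_boundaries_py text start end_ (snap_to_word_boundaries_py text start end_)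

def Claim_raises_snap_to_word_boundaries_py : Prop := (∀ (text : String) (start : Int) (end_ : Int), Dom_snap_to_word_boundaries_py text start end_ → Raises_snap_to_word_boundaries_py text start end_ → ¬ Pre_snap_to_word_boundaries_py text start end_) ∧ (Dom_snap_to_word_boundaries_py (pvRaiseWitness_snap_to_word_boundaries_py.1) (pvRaiseWitness_snap_to_word_boundaries_py.2.1) (pvRaiseWitness_snap_to_word_boundaries_py.2.2) ∧ Raises_snap_to_word_boundaries_py (pvRaiseWitness_snap_to_word_boundaries_py.1) (pvRaiseWitness_snap_to_word_boundaries_py.2.1) (pvRaiseWitness_snap_to_word_boundaries_py.2.2) ∧ snap_to_word_boundaries_py_alt (pvRaiseWitness_snap_to_word_boundaries_py.1) (pvRaiseWitness_snap_to_word_boundaries_py.2.1) (pvRaiseWitness_snap_to_word_boundaries_py.2.2) = pvRaiseWitnessOut_snap_to_word_boundaries_py)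

-- ===== LEMMAS AND PROOFS =====

-- last index < k at which character c occurs in cs, or -1 (the value of rfind(c, 0, k))
def pvBest (cs : List Char) (c : Char) : Nat → Int
  | 0 => -1
  | m + 1 => if cs[m]? = some c then (m : Int) else pvBest cs c m

theorem pvBest_le (cs : List Char) (c : Char) (k : Nat) : pvBest cs c k ≤ (k : Int) - 1 := by
  induction k with
  | zero => simp [pvBest]
  | succ m ih => simp only [pvBest]; split <;> push_cast <;> omega

theorem pv_prefix_single (c : Char) (xs : List Char) :
    ([c].isPrefixOf xs) = true ↔ xs[0]? = some c := by
  cases xs <;> simp [List.isPrefixOf]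
  exact eq_comm

theorem pv_rfind_go_eq (cs : List Char) (c : Char) (j : Nat) :
    PySem.Chars.rfind.go cs [c] j = pvBest cs c (j + 1) := by
  induction j with
  | zero =>
    simp only [PySem.Chars.rfind.go, pvBest]
    by_cases h : cs[0]? = some c
    · rw [if_pos ((pv_prefix_single c cs).2 h), if_pos h]; norm_num
    · rw [if_neg (fun hx => h ((pv_prefix_single c cs).1 hx)), if_neg h]
  | succ j ih =>
    simp only [PySem.Chars.rfind.go] at *
    have hidx : (cs.drop (j + 1))[0]? = cs[j + 1]? := by
      rw [List.getElem?_drop]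
    by_cases h : cs[j + 1]? = some c
    · rw [if_pos ((pv_prefix_single c _).2 (hidx.trans h))]
      simp [pvBest, h]
    · rw [if_neg (by rw [pv_prefix_single, hidx]; exact h)]
      rw [ih]; simp [pvBest, h]

theorem pv_rfind_single (cs : List Char) (c : Char) :
    PySem.Chars.rfind cs [c] = pvBest cs c cs.length := by
  rw [PySem.Chars.rfind, pv_rfind_go_eq]
  simp [pvBest]

theorem pvBest_take (cs : List Char) (c : Char) (k j : Nat) (h : j ≤ k) :
    pvBest (cs.take k) c j = pvBest cs c j := by
  induction j with
  | zero => rfl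
  | succ m ih =>
    simp only [pvBest, List.getElem?_take_of_lt (show m < k by omega)]
    rw [ih (by omega)]

-- text.rfind(c, 0, k) for an in-range k is pvBest
theorem pv_rfindFrom_single (cs : List Char) (c : Char) (k : Nat) (hk : k ≤ cs.length) :
    PySem.Chars.rfindFrom cs [c] 0 (some (k : Int)) = pvBest cs c k := by
  have hr : PySem.Chars.rfind (cs.take k) [c] = pvBest cs c k := by
    rw [pv_rfind_single]
    rw [List.length_take, Nat.min_eq_left hk, pvBest_take cs c k k le_rfl]
  simp only [PySem.Chars.rfindFrom]
  rw [if_neg (show ¬ ((cs.length : Int) < (k : Int)) by omega)]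
  rw [if_neg (show ¬ ((0:Int) < 0) by omega)]
  rw [if_neg (show ¬ ((k:Int) < 0) by omega)]
  rw [if_neg (show ¬ ((k:Int) < 0) by omega)]
  simp only [Int.toNat_natCast, Int.toNat_zero, List.drop_zero, hr]
  have := pvBest_le cs c k
  split <;> omega

-- text.find(c, k) primitives
theorem pv_find_go_single (c : Char) (ds : List Char) (k : Nat) :
    PySem.Chars.find.go [c] ds k = if c ∈ ds then ((k : Int) + (ds.idxOf c : Int)) else -1 := by
  induction ds generalizing k with
  | nil => simp [PySem.Chars.find.go]
  | cons h t ih =>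
    simp only [PySem.Chars.find.go]
    by_cases hc : h = c
    · subst hc
      rw [if_pos (by rw [pv_prefix_single]; simp)]
      simp [List.idxOf_cons_self]
    · rw [if_neg (by rw [pv_prefix_single]; simpa using hc)]
      rw [ih]
      have hm : (c ∈ h :: t) ↔ c ∈ t := by simp [Ne.symm hc]
      by_cases hmem : c ∈ t
      · rw [if_pos hmem, if_pos (hm.2 hmem)]
        rw [List.idxOf_cons_ne _ (by simpa using hc)]
        push_cast; ring
      · rw [if_neg hmem, if_neg (fun hx => hmem (hm.1 hx))]

theorem pv_findFrom_single (cs : List Char) (c : Char) (e : Nat) (he : e ≤ cs.length) :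
    PySem.Chars.findFrom cs [c] (e : Int) none =
      if c ∈ cs.drop e then ((e : Int) + ((cs.drop e).idxOf c : Int)) else -1 := by
  simp only [PySem.Chars.findFrom]
  rw [if_neg (show ¬ ((e:Int) < 0) by omega)]
  rw [if_neg (show ¬ ((cs.length:Int) < (e:Int)) by omega)]
  simp only [Int.toNat_natCast, List.take_length, PySem.Chars.find, pv_find_go_single,
    Int.natCast_zero, zero_add]
  by_cases hmem : c ∈ cs.drop e
  · rw [if_pos hmem, if_pos hmem, if_neg (show ¬ (((cs.drop e).idxOf c : Int)) = -1 by omega)]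
  · simp [hmem]

theorem pv_findFrom_step (cs : List Char) (c : Char) (e : Nat) (he : e < cs.length)
    (hne : c ≠ cs[e]) :
    PySem.Chars.findFrom cs [c] (e : Int) none =
      PySem.Chars.findFrom cs [c] ((e + 1 : Nat) : Int) none := by
  rw [pv_findFrom_single cs c e (by omega), pv_findFrom_single cs c (e+1) (by omega)]
  have hdrop : cs.drop e = cs[e] :: cs.drop (e + 1) := List.drop_eq_getElem_cons he
  rw [hdrop]
  have hm : (c ∈ cs[e] :: cs.drop (e+1)) ↔ c ∈ cs.drop (e+1) := by
    constructor
    · intro hx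
      rcases List.mem_cons.1 hx with h | h
      · exact absurd h hne
      · exact h
    · exact fun hx => List.mem_cons.2 (Or.inr hx)
  by_cases hmem : c ∈ cs.drop (e+1)
  · rw [if_pos (hm.2 hmem), if_pos hmem]
    rw [List.idxOf_cons_ne _ (by simpa using (Ne.symm hne))]
    push_cast; ring
  · rw [if_neg (fun hx => hmem (hm.1 hx)), if_neg hmem]

-- max?/min? extraction
theorem pv_max_getD {xs : List Int} {a d : Int} (hmem : a ∈ xs) (hub : ∀ y ∈ xs, y ≤ a) :
    (PySem.List.max? xs (fun x => x)).getD d = a := by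
  obtain ⟨m, hm⟩ : ∃ m, PySem.List.max? xs (fun x => x) = some m := by
    cases h : PySem.List.max? xs (fun x => x) with
    | none => rw [PySem.List.max?_eq_none_iff] at h; subst h; simp at hmem
    | some m => exact ⟨m, rfl⟩
  rw [hm]
  exact le_antisymm (hub m (PySem.List.max?_mem hm)) (PySem.List.max?_isMax hm a hmem)

theorem pv_min_getD {xs : List Int} {a d : Int} (hmem : a ∈ xs) (hlb : ∀ y ∈ xs, a ≤ y) :
    (PySem.List.min? xs (fun x => x)).getD d = a := by
  obtain ⟨m, hm⟩ : ∃ m, PySem.List.min? xs (fun x => x) = some m := by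
    cases h : PySem.List.min? xs (fun x => x) with
    | none => rw [PySem.List.min?_eq_none_iff] at h; subst h; simp at hmem
    | some m => exact ⟨m, rfl⟩
  rw [hm]
  exact le_antisymm (PySem.List.min?_isMin hm a hmem) (hlb m (PySem.List.min?_mem hm))

theorem pv_contains_iff (ch : Char) : pvBSet.contains ch = true ↔ ch ∈ pvBStr.toList := by
  unfold pvBSet
  rw [PySem.Set.contains, List.contains_iff_mem]
  exact PySem.Set.mem_ofList pvBStr.toList ch

theorem pv_len_eq (text : String) : PySem.Str.len text = (text.toList.length : Int) := by
  simp [PySem.Str.len]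

-- the left loop equals max-of-rfind(+1)
theorem pv_left_eq (text : String) (s : Nat) (hs : s ≤ text.toList.length) :
    pvLoopL text (s : Int) =
      (PySem.List.max? (pvBStr.toList.map (fun c => pvBest text.toList c s)) (fun x => x)).getD (-1) + 1 := by
  induction s with
  | zero =>
    rw [pvLoopL, dif_neg (show ¬ (0:Int) < ((0:Nat):Int) by omega)]
    rw [pv_max_getD (a := -1) (d := -1)]
    · norm_num
    · exact List.mem_map.2 ⟨' ', by decide, rfl⟩
    · intro y hy
      obtain ⟨c, _, rfl⟩ := List.mem_map.1 hy
      simp [pvBest]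
  | succ s ih =>
    have hs' : s < text.toList.length := by omega
    have hcast : ((s + 1 : Nat) : Int) - 1 = ((s : Nat) : Int) := by push_cast; ring
    have hget : PySem.Str.pyGet? text (((s + 1 : Nat) : Int) - 1) = some text.toList[s] := by
      rw [hcast, PySem.Str.pyGet?_natCast, List.getElem?_eq_getElem hs']
    rw [pvLoopL, dif_pos (show (0:Int) < ((s + 1 : Nat) : Int) by push_cast; omega), hget]
    simp only
    by_cases hb : text.toList[s] ∈ pvBStr.toList
    · rw [if_pos ((pv_contains_iff _).2 hb)]
      rw [pv_max_getD (a := (s : Int)) (d := -1)]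
      · push_cast; ring
      · refine List.mem_map.2 ⟨text.toList[s], hb, ?_⟩
        simp [pvBest, List.getElem?_eq_getElem hs']
      · intro y hy
        obtain ⟨c, _, rfl⟩ := List.mem_map.1 hy
        have := pvBest_le text.toList c (s + 1)
        push_cast at this ⊢; omega
    · rw [if_neg (fun hx => hb ((pv_contains_iff _).1 hx))]
      rw [hcast, ih (by omega)]
      have hmap : pvBStr.toList.map (fun c => pvBest text.toList c (s + 1)) =
          pvBStr.toList.map (fun c => pvBest text.toList c s) := by
        refine List.map_congr_left (fun c hc => ?_)
        have hne : ¬ text.toList[s]? = some c := by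
          rw [List.getElem?_eq_getElem hs']
          intro hx
          rw [Option.some.injEq] at hx
          exact hb (by rw [hx]; exact hc)
        simp [pvBest, hne]
      rw [hmap]

-- the right loop equals min-of-kept-finds, for a nonnegative in-range end
theorem pv_right_eq (text : String) (e : Nat) (he : e ≤ text.toList.length) :
    pvLoopR text (e : Int) =
      (if ((pvBStr.toList.map (fun c => PySem.Chars.findFrom text.toList [c] (e : Int) none)).filter (fun p => p ≠ -1)).isEmpty
       then (text.toList.length : Int)
       else (PySem.List.min? ((pvBStr.toList.map (fun c => PySem.Chars.findFrom text.toList [c] (e : Int) none)).filter (fun p => p ≠ -1)) (fun x => x)).getD 0) := by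
  have hfuel : ∀ (d e : Nat), e ≤ text.toList.length → text.toList.length - e = d →
      pvLoopR text (e : Int) =
      (if ((pvBStr.toList.map (fun c => PySem.Chars.findFrom text.toList [c] (e : Int) none)).filter (fun p => p ≠ -1)).isEmpty
       then (text.toList.length : Int)
       else (PySem.List.min? ((pvBStr.toList.map (fun c => PySem.Chars.findFrom text.toList [c] (e : Int) none)).filter (fun p => p ≠ -1)) (fun x => x)).getD 0) := by
    intro d
    induction d with
    | zero =>
      intro e he hd
      have he' : e = text.toList.length := by omega
      subst he'
      rw [pvLoopR, dif_neg (by rw [pv_len_eq]; omega)]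
      have hnil : (pvBStr.toList.map (fun c => PySem.Chars.findFrom text.toList [c] ((text.toList.length : Nat) : Int) none)).filter (fun p => p ≠ -1) = [] := by
        rw [List.filter_eq_nil_iff]
        intro x hx
        obtain ⟨c, _, rfl⟩ := List.mem_map.1 hx
        rw [pv_findFrom_single _ _ _ le_rfl, List.drop_length]
        simp
      rw [hnil]
      simp
    | succ d ihd =>
      intro e he hd
      have he' : e < text.toList.length := by omega
      have hget : PySem.Str.pyGet? text ((e : Nat) : Int) = some text.toList[e] := by
        rw [PySem.Str.pyGet?_natCast, List.getElem?_eq_getElem he']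
      rw [pvLoopR, dif_pos (by rw [pv_len_eq]; omega), hget]
      simp only
      by_cases hb : text.toList[e] ∈ pvBStr.toList
      · rw [if_pos ((pv_contains_iff _).2 hb)]
        have hval : PySem.Chars.findFrom text.toList [text.toList[e]] (e : Int) none = (e : Int) := by
          rw [pv_findFrom_single _ _ _ (by omega)]
          rw [List.drop_eq_getElem_cons he']
          rw [if_pos (List.mem_cons_self), List.idxOf_cons_self]
          simp
        have hmemf : (e : Int) ∈ (pvBStr.toList.map (fun c => PySem.Chars.findFrom text.toList [c] (e : Int) none)).filter (fun p => p ≠ -1) := by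
          rw [List.mem_filter]
          refine ⟨List.mem_map.2 ⟨text.toList[e], hb, hval⟩, by simp⟩
        rw [if_neg (by intro hx; rw [List.isEmpty_iff] at hx; rw [hx] at hmemf; simp at hmemf)]
        rw [pv_min_getD hmemf]
        intro y hy
        rw [List.mem_filter] at hy
        obtain ⟨hy1, hy2⟩ := hy
        obtain ⟨c, _, rfl⟩ := List.mem_map.1 hy1
        rw [pv_findFrom_single _ _ _ (by omega)] at hy2 ⊢
        split
        · omega
        · simp_all
      · rw [if_neg (fun hx => hb ((pv_contains_iff _).1 hx))]
        have hcast : ((e : Nat) : Int) + 1 = ((e + 1 : Nat) : Int) := by push_cast; ring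
        rw [hcast, ihd (e + 1) (by omega) (by omega)]
        have hmap : pvBStr.toList.map (fun c => PySem.Chars.findFrom text.toList [c] ((e + 1 : Nat) : Int) none) =
            pvBStr.toList.map (fun c => PySem.Chars.findFrom text.toList [c] ((e : Nat) : Int) none) := by
          refine List.map_congr_left (fun c hc => ?_)
          exact (pv_findFrom_step text.toList c e he' (fun hx => hb (hx ▸ hc))).symm
        rw [hmap]
  exact hfuel (text.toList.length - e) e he rfl

theorem pv_toList_mk (l : List Char) : (String.mk l).toList = l :=
  Eq.symm ((fun {l} {s} => String.ofList_eq.mp) rfl)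

-- ===== VERDICT (by name: the statement is the Claim_ definition above) =====
theorem snap_to_word_boundaries_py_spec : Claim_equal_snap_to_word_boundaries_py := by
  intro text start end_ _ hP
  obtain ⟨h2, h4⟩ := hP
  unfold Spec_snap_to_word_boundaries_py snap_to_word_boundaries_py snap_to_word_boundaries_py_alt
  simp only
  refine Prod.ext ?_ ?_
  · -- left component
    simp only
    by_cases hstart : 0 < start
    · obtain ⟨s, rfl⟩ : ∃ s : Nat, start = (s : Int) := ⟨start.toNat, by omega⟩
      have hs : s ≤ text.toList.length := by exact_mod_cast h2
      rw [if_pos hstart, pv_left_eq text s hs]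
      have hmap : pvBStr.toList.map (fun c => PySem.Str.rfindFrom text (String.mk [c]) 0 (some (s : Int))) =
          pvBStr.toList.map (fun c => pvBest text.toList c s) := by
        refine List.map_congr_left (fun c _ => ?_)
        rw [PySem.Str.rfindFrom, pv_toList_mk]
        exact pv_rfindFrom_single text.toList c s hs
      rw [hmap]
    · rw [if_neg hstart, pvLoopL, dif_neg hstart]
  · -- right component
    simp only
    by_cases hend : end_ < (text.toList.length : Int)
    · rw [if_pos (by rw [pv_len_eq]; exact hend)]
      obtain ⟨e, rfl⟩ : ∃ e : Nat, end_ = (e : Int) := ⟨end_.toNat, by omega⟩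
      have he : e ≤ text.toList.length := by omega
      rw [pv_right_eq text e he]
      have hmap : pvBStr.toList.map (fun c => PySem.Str.findFrom text (String.mk [c]) (e : Int)) =
          pvBStr.toList.map (fun c => PySem.Chars.findFrom text.toList [c] (e : Int) none) := by
        refine List.map_congr_left (fun c _ => ?_)
        rw [PySem.Str.findFrom, pv_toList_mk]
      rw [hmap, pv_len_eq]
    · rw [if_neg (by rw [pv_len_eq]; exact hend), pvLoopR, dif_neg (by rw [pv_len_eq]; exact hend)]

set_option maxRecDepth 4096 in
@[simp] theorem snap_to_word_boundaries_py_raises : Claim_raises_snap_to_word_boundaries_py := by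
  unfold Claim_raises_snap_to_word_boundaries_py
  constructor
  · intro text start end_ _ hR hP
    unfold Raises_snap_to_word_boundaries_py at hR
    unfold Pre_snap_to_word_boundaries_py at hP
    omega
  · refine ⟨by decide, by decide, by decide⟩
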